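-- pv_equiv track=rewrite | github.com/Hzan-2/Software-test | automationtestforbdd-develop/common/getVariable.py | time_formatting
-- ===== SOURCE A (Python) =====
-- def time_formatting(timeFormat,timeValue):
--     if len(timeFormat) == 17:
--         if timeValue.count(' ') == 1:
--             pass
--         else:
--             x = ''
--             newTimeValue = timeValue.replace(' ', '')
--             for i in range(len(newTimeValue)):
--                 if i == 10:
--                     x = x + ' ' + newTimeValue[i]
--                 else:
--                     x = x + newTimeValue[i]
--             timeValue = x
--     else:
--         timeValue = timeValue.replace(' ', '')
--     return timeValue
-- ===== SOURCE B (Python) =====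
-- def time_formatting(timeFormat, timeValue):
--     if len(timeFormat) != 17:
--         return timeValue.replace(' ', '')
--     if timeValue.count(' ') == 1:
--         return timeValue
--     s = timeValue.replace(' ', '')
--     if len(s) > 10:
--         return s[:10] + ' ' + s[10:]
--     return s
-- ===== Notes on version B (the rewrite author's own statement) =====
-- stated objective: simpler
-- what changed: The char-by-char accumulating index loop with the i==10 test is replaced by a single slice-concatenation s[:10] + ' ' + s[10:] (guarded by len(s) > 10, where the loop inserts nothing), and the nesting becomes an early-return chain.
import Mathlib
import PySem

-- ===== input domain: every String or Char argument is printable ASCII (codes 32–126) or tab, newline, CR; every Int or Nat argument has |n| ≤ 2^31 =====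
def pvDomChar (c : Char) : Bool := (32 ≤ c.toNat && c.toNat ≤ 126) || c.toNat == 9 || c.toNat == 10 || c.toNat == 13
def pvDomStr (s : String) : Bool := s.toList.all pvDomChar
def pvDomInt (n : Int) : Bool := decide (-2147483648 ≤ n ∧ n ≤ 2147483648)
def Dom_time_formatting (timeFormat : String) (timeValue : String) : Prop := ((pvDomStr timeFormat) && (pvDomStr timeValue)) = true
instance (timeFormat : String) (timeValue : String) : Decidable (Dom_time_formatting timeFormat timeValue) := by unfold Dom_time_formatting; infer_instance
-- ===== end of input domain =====

-- B replaces A's char-by-char index loop (with its i==10 test) by a single guarded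
-- slice-concatenation, for a simpler early-return decomposition; same return values.


-- ===== PORT A =====
-- the accumulating loop: for i in range(len(newTimeValue)): if i == 10: x = x+' '+new[i] else x = x+new[i]
-- (the accumulator string x is carried as a List Char and converted back at the end; exact on the domain)
def time_formatting (timeFormat : String) (timeValue : String) : String :=
  if PySem.Str.len timeFormat = 17 then
    if PySem.Str.count timeValue " " = 1 then timeValue
    else
      let newTimeValue := (PySem.Str.replace timeValue " " "").toList
      let x := (PySem.List.pyRange 0 (newTimeValue.length : Int) 1).foldl
        (fun x i =>
          if i = 10 then x ++ [' ', PySem.List.pyGetD newTimeValue i ' ']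
          else x ++ [PySem.List.pyGetD newTimeValue i ' '])
        ([] : List Char)
      String.ofList x
  else PySem.Str.replace timeValue " " ""

-- ===== PORT B =====
-- s[:10] + ' ' + s[10:] as slices on the code points (exact on the domain)
def time_formatting_alt (timeFormat : String) (timeValue : String) : String :=
  if PySem.Str.len timeFormat = 17 then
    if PySem.Str.count timeValue " " = 1 then timeValue
    else
      let s := (PySem.Str.replace timeValue " " "").toList
      if 10 < s.length then
        String.ofList (PySem.List.slice s none (some 10) ++ ' ' :: PySem.List.slice s (some 10) none)
      else String.ofList s
  else PySem.Str.replace timeValue " " ""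

-- ===== PRECONDITION & SPEC =====
def Spec_time_formatting (timeFormat : String) (timeValue : String) (out : String) : Prop := out = time_formatting_alt timeFormat timeValue
instance (timeFormat : String) (timeValue : String) (out : String) : Decidable (Spec_time_formatting timeFormat timeValue out) := by unfold Spec_time_formatting; infer_instance

-- ===== CLAIM (what is proved, stated in full; the proofs are below) =====
def Claim_equal_time_formatting : Prop := ∀ (timeFormat : String) (timeValue : String), Dom_time_formatting timeFormat timeValue → Spec_time_formatting timeFormat timeValue (time_formatting timeFormat timeValue)

-- ===== LEMMAS AND PROOFS =====

-- A's loop, run over the first n characters of cs: the invariant of the accumulator.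
theorem loopA_aux (cs : List Char) (n : Nat) (h : n ≤ cs.length) :
    (PySem.List.pyRange 0 (n : Int) 1).foldl
      (fun x i =>
        if i = 10 then x ++ [' ', PySem.List.pyGetD cs i ' ']
        else x ++ [PySem.List.pyGetD cs i ' '])
      ([] : List Char)
    = if n ≤ 10 then cs.take n else cs.take 10 ++ ' ' :: ((cs.take n).drop 10) := by
  induction n with
  | zero => simp
  | succ m ih =>
    have hm : m ≤ cs.length := Nat.le_of_succ_le h
    have hlt : m < cs.length := h
    have hsplit : PySem.List.pyRange 0 ((m + 1 : Nat) : Int) 1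
        = PySem.List.pyRange 0 (m : Nat) 1 ++ [(m : Int)] := by
      have := PySem.List.pyRange_one_succ_right (a := 0) (b := (m : Int)) (by positivity)
      push_cast
      simpa using this
    rw [hsplit, List.foldl_append, ih hm]
    have hget : PySem.List.pyGetD cs ((m : Nat) : Int) ' ' = cs[m] := by
      rw [PySem.List.pyGetD_natCast]
      exact List.getD_eq_getElem cs ' ' hlt
    simp only [List.foldl_cons, List.foldl_nil, hget]
    have htake : cs.take (m + 1) = cs.take m ++ [cs[m]] := by
      rw [List.take_add_one, List.getElem?_eq_getElem hlt]; simp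
    by_cases h10 : (m : Int) = 10
    · have hm10 : m = 10 := by exact_mod_cast h10
      subst hm10
      simp only [if_pos (le_refl 10), if_neg (by omega : ¬ 10 + 1 ≤ 10), htake]
      rw [List.drop_append_of_le_length (by simp [List.length_take]; omega)]
      simp [List.drop_eq_nil_of_le, List.length_take]
    · have hm10 : m ≠ 10 := by exact_mod_cast fun hh => h10 (by exact_mod_cast hh)
      rw [if_neg h10]
      by_cases hle : m + 1 ≤ 10
      · rw [if_pos (by omega : m ≤ 10), if_pos hle, htake]
      · have h11 : ¬ m ≤ 10 := by omega
        rw [if_neg h11, if_neg hle, htake]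
        rw [List.drop_append_of_le_length (by simp [List.length_take]; omega)]
        simp

-- A's loop over the whole string equals B's guarded slice-concatenation.
theorem loopA_eq (cs : List Char) :
    (PySem.List.pyRange 0 (cs.length : Int) 1).foldl
      (fun x i =>
        if i = 10 then x ++ [' ', PySem.List.pyGetD cs i ' ']
        else x ++ [PySem.List.pyGetD cs i ' '])
      ([] : List Char)
    = if 10 < cs.length then
        PySem.List.slice cs none (some 10) ++ ' ' :: PySem.List.slice cs (some 10) none
      else cs := by
  rw [loopA_aux cs cs.length (le_refl _)]
  have h1 : PySem.List.slice cs none (some (10 : Int)) = cs.take 10 := by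
    have := PySem.List.slice_to_natCast (xs := cs) (b := 10)
    simpa using this
  have h2 : PySem.List.slice cs (some (10 : Int)) none = cs.drop 10 := by
    have := PySem.List.slice_from_natCast (xs := cs) (a := 10)
    simpa using this
  by_cases h : 10 < cs.length
  · rw [if_pos h, if_neg (by omega), h1, h2, List.take_length]
  · rw [if_neg h, if_pos (by omega), List.take_length]

-- ===== VERDICT (by name: the statement is the Claim_ definition above) =====
theorem time_formatting_spec : Claim_equal_time_formatting := by
  intro timeFormat timeValue _
  unfold Spec_time_formatting time_formatting time_formatting_alt
  by_cases h17 : PySem.Str.len timeFormat = 17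
  · rw [if_pos h17, if_pos h17]
    by_cases hc : PySem.Str.count timeValue " " = 1
    · rw [if_pos hc, if_pos hc]
    · rw [if_neg hc, if_neg hc]
      simp only []
      rw [loopA_eq]
      split <;> rfl
  · rw [if_neg h17, if_neg h17]
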